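-- pv_equiv track=rewrite | github.com/ofrik2/prompt-engineering-project | src/prompt_lab/dataset/generator.py | pad_prompt_to_target_tokens
-- ===== SOURCE A (Python) =====
-- PADDING_SENTENCE = (
--     "This sentence is additional neutral context for an academic experiment "
--     "and does not affect the correct answer."
-- )
--
-- def pad_prompt_to_target_tokens(prompt: str, target_tokens: int) -> str:
--     """
--     Approximate token count using whitespace-split and pad with a neutral sentence
--     BEFORE the final 'Answer:' marker (if present), so that we reach roughly
--     target_tokens tokens without changing the answer format.
--     """
--     words = prompt.split()
--     current = len(words)
--
--     if current >= target_tokens: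
--         return prompt  # already long enough
--
--     pad_words = PADDING_SENTENCE.split()
--     extra_blocks: list[str] = []
--
--     # Add as many padding sentences as needed
--     while current + len(pad_words) <= target_tokens:
--         extra_blocks.append(PADDING_SENTENCE)
--         current += len(pad_words)
--
--     padding_text = "\n".join(extra_blocks)
--
--     marker = "Answer:"
--     if marker in prompt:
--         # Insert padding *before* "Answer:" so the label is still the last thing
--         before, after = prompt.split(marker, 1)
--         return before.rstrip() + "\n\n" + padding_text + "\n\n" + marker + after.lstrip()
--     else:
--         # Fallback: append padding at the end
--         return prompt.rstrip() + "\n\n" + padding_text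
-- ===== SOURCE B (Python) =====
-- PADDING_SENTENCE = (
--     "This sentence is additional neutral context for an academic experiment "
--     "and does not affect the correct answer."
-- )
--
--
-- def pad_prompt_to_target_tokens(prompt: str, target_tokens: int) -> str:
--     deficit = target_tokens - len(prompt.split())
--     if deficit <= 0:
--         return prompt
--     k = deficit // len(PADDING_SENTENCE.split())
--     padding_text = "\n".join([PADDING_SENTENCE] * k)
--     i = prompt.find("Answer:")
--     if i == -1:
--         return prompt.rstrip() + "\n\n" + padding_text
--     return (prompt[:i].rstrip() + "\n\n" + padding_text + "\n\n"
--             + "Answer:" + prompt[i + 7:].lstrip())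
-- ===== Notes on version B (the rewrite author's own statement) =====
-- stated objective: simpler
-- what changed: Replaces A's accumulating while loop with a closed-form floor-division block count joined from a replicated list, and replaces the 'in'+split(marker,1) marker handling with a single find plus slicing.
import Mathlib
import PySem

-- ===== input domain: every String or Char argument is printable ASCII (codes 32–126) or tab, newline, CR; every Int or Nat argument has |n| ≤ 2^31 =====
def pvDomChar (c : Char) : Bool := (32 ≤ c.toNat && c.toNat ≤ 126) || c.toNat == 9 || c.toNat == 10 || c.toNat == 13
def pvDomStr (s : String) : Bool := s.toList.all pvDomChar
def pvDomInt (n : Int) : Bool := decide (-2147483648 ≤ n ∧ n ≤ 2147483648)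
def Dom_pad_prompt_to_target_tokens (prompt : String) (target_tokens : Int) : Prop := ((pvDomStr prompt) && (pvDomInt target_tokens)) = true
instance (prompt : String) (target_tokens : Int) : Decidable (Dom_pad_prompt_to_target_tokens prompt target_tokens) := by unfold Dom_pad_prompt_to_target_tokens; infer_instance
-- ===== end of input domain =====

-- B replaces A's accumulating while loop with a closed-form block count (floor division)
-- and A's `in`+split marker handling with a single find + slicing; objective: simpler.

-- ===== PORT A =====
def pvPADDING : String := "This sentence is additional neutral context for an academic experiment and does not affect the correct answer."

-- cited by pvPadLoop's decreasing_by: the padding sentence splits into 17 words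
theorem pvPadWordsLen : ((PySem.Str.split₀ pvPADDING).length : Int) = 17 := by decide

-- A's `while current + len(pad_words) <= target_tokens:` accumulation loop
def pvPadLoop (target_tokens current : Int) (acc : List String) : List String :=
  if current + ((PySem.Str.split₀ pvPADDING).length : Int) ≤ target_tokens then
    pvPadLoop target_tokens (current + ((PySem.Str.split₀ pvPADDING).length : Int)) (acc ++ [pvPADDING])
  else acc
  termination_by (target_tokens - current).toNat
  decreasing_by have h := pvPadWordsLen; omega

def pad_prompt_to_target_tokens (prompt : String) (target_tokens : Int) : String :=
  let words := PySem.Str.split₀ prompt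
  let current : Int := words.length
  if current ≥ target_tokens then prompt
  else
    let extra_blocks := pvPadLoop target_tokens current []
    let padding_text := PySem.Str.join "\n" extra_blocks
    let marker := "Answer:"
    if PySem.Str.isIn marker prompt then
      match PySem.Str.splitMax? prompt marker 1 with
      | some (before :: after :: _) =>
          PySem.Str.rstrip before ++ "\n\n" ++ padding_text ++ "\n\n" ++ marker ++ PySem.Str.lstrip after
      | _ => ""  -- unreachable: sep is non-empty and present, so split(sep, 1) yields two pieces
    else
      PySem.Str.rstrip prompt ++ "\n\n" ++ padding_text

-- ===== PORT B =====
def pad_prompt_to_target_tokens_alt (prompt : String) (target_tokens : Int) : String :=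
  let deficit := target_tokens - ((PySem.Str.split₀ prompt).length : Int)
  if deficit ≤ 0 then prompt
  else
    let k := PySem.Int.floordiv deficit ((PySem.Str.split₀ pvPADDING).length : Int)
    let padding_text := PySem.Str.join "\n" (List.replicate k.toNat pvPADDING)
    let i := PySem.Str.find prompt "Answer:"
    if i = -1 then
      PySem.Str.rstrip prompt ++ "\n\n" ++ padding_text
    else
      PySem.Str.rstrip (PySem.Str.slice prompt (some 0) (some i)) ++ "\n\n" ++ padding_text ++ "\n\n"
        ++ "Answer:" ++ PySem.Str.lstrip (PySem.Str.slice prompt (some (i + 7)) none)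

-- ===== PRECONDITION & SPEC =====
def Spec_pad_prompt_to_target_tokens (prompt : String) (target_tokens : Int) (out : String) : Prop := out = pad_prompt_to_target_tokens_alt prompt target_tokens
instance (prompt : String) (target_tokens : Int) (out : String) : Decidable (Spec_pad_prompt_to_target_tokens prompt target_tokens out) := by unfold Spec_pad_prompt_to_target_tokens; infer_instance

-- ===== CLAIM (what is proved, stated in full; the proofs are below) =====
def Claim_equal_pad_prompt_to_target_tokens : Prop := ∀ (prompt : String) (target_tokens : Int), Dom_pad_prompt_to_target_tokens prompt target_tokens → Spec_pad_prompt_to_target_tokens prompt target_tokens (pad_prompt_to_target_tokens prompt target_tokens)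

-- ===== LEMMAS AND PROOFS =====

-- A's while loop appends exactly ⌊(target_tokens - current) / 17⌋ copies of the padding sentence.
theorem pvPadLoop_eq (target_tokens : Int) : ∀ (current : Int) (acc : List String),
    pvPadLoop target_tokens current acc =
      acc ++ List.replicate ((PySem.Int.floordiv (target_tokens - current) 17).toNat) pvPADDING := by
  intro current acc
  fun_induction pvPadLoop with
  | case1 current acc h ih =>
      rw [ih]
      rw [pvPadWordsLen] at h ⊢
      rw [PySem.Int.floordiv_eq_ediv_of_pos (by norm_num), PySem.Int.floordiv_eq_ediv_of_pos (by norm_num)]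
      have h1 : ((target_tokens - current) / 17).toNat = ((target_tokens - (current + 17)) / 17).toNat + 1 := by omega
      rw [h1, List.replicate_succ, List.append_assoc]
      rfl
  | case2 current acc h =>
      rw [pvPadWordsLen] at h
      rw [PySem.Int.floordiv_eq_ediv_of_pos (by norm_num)]
      have h1 : ((target_tokens - current) / 17).toNat = 0 := by omega
      rw [h1]
      simp

-- splitOnMax.go with maxsplit exhausted returns the remainder as one final piece
theorem pvSplitGoZero (sep : List Char) : ∀ (fuel : Nat) (l cur : List Char) (acc : List (List Char)),
    PySem.Chars.splitOnMax.go sep fuel 0 l cur acc = ((cur.reverse ++ l) :: acc).reverse := by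
  intro fuel l cur acc
  cases fuel with
  | zero => rw [PySem.Chars.splitOnMax.go]
  | succ f =>
      cases l with
      | nil => rw [PySem.Chars.splitOnMax.go] <;> simp
      | cons c t => rw [PySem.Chars.splitOnMax.go]; simp

-- find.go started one character later
theorem pvFindGoShift (sub : List Char) (hsub : sub ≠ []) : ∀ (l : List Char) (k : Nat),
    PySem.Chars.find.go sub l (k + 1) =
      if PySem.Chars.find.go sub l k = -1 then -1 else PySem.Chars.find.go sub l k + 1 := by
  intro l
  induction l with
  | nil => intro k; simp [PySem.Chars.find.go, List.isEmpty_iff, hsub]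
  | cons c t ih =>
      intro k
      rw [PySem.Chars.find.go, PySem.Chars.find.go]
      by_cases hp : sub.isPrefixOf (c :: t)
      · simp [hp]
      · simp only [hp, Bool.false_eq_true, if_false]
        exact ih (k + 1)

-- the one-split scan of splitOnMax.go, located by find
theorem pvSplitGoOne (sep : List Char) (hsep : sep ≠ []) : ∀ (l : List Char) (fuel : Nat),
    l.length ≤ fuel → ∀ (cur : List Char) (acc : List (List Char)),
    PySem.Chars.splitOnMax.go sep (fuel + 1) 1 l cur acc =
      if PySem.Chars.find l sep = -1 then ((cur.reverse ++ l) :: acc).reverse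
      else (l.drop ((PySem.Chars.find l sep).toNat + sep.length)
              :: (cur.reverse ++ l.take (PySem.Chars.find l sep).toNat) :: acc).reverse := by
  intro l
  induction l with
  | nil =>
      intro fuel _ cur acc
      rw [PySem.Chars.splitOnMax.go] <;> simp [PySem.Chars.find, PySem.Chars.find.go, List.isEmpty_iff, hsep]
  | cons c t ih =>
      intro fuel hlen cur acc
      rw [PySem.Chars.splitOnMax.go]
      by_cases hp : sep.isPrefixOf (c :: t)
      · -- match at position 0
        have hfind : PySem.Chars.find (c :: t) sep = 0 := by
          rw [PySem.Chars.find, PySem.Chars.find.go]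
          simp [hp]
        rw [pvSplitGoZero]
        simp [hp, hfind]
      · -- no match at head: step to t with index shift
        have hfind : PySem.Chars.find (c :: t) sep =
            if PySem.Chars.find t sep = -1 then -1 else PySem.Chars.find t sep + 1 := by
          rw [PySem.Chars.find, PySem.Chars.find.go]
          simp only [hp, Bool.false_eq_true, if_false]
          exact pvFindGoShift sep hsep t 0
        cases fuel with
        | zero => simp at hlen
        | succ f =>
            simp only [hp, Bool.false_eq_true, if_false]
            have h2 : t.length ≤ f := by simp at hlen; omega
            rw [ih f h2 (c :: cur) acc]
            by_cases hm : PySem.Chars.find t sep = -1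
            · simp [hfind, hm]
            · have hge : 0 ≤ PySem.Chars.find t sep := by
                have := PySem.Chars.neg_one_le_find t sep
                omega
              rw [hfind]
              simp only [hm, if_false]
              have h3 : ¬ (PySem.Chars.find t sep + 1 = -1) := by omega
              simp only [h3, if_false]
              have h4 : (PySem.Chars.find t sep + 1).toNat = (PySem.Chars.find t sep).toNat + 1 := by omega
              rw [h4]
              simp [List.take_succ_cons, List.drop_succ_cons, Nat.add_right_comm]

-- s.split(sep, 1) described by s.find(sep)
theorem pvSplitOnMaxOne (s sep : List Char) (hsep : sep ≠ []) :
    PySem.Chars.splitOnMax s sep 1 =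
      if PySem.Chars.find s sep = -1 then [s]
      else [s.take (PySem.Chars.find s sep).toNat,
            s.drop ((PySem.Chars.find s sep).toNat + sep.length)] := by
  rw [PySem.Chars.splitOnMax]
  norm_num
  rw [pvSplitGoOne sep hsep s s.length (le_refl _)]
  split_ifs <;> simp

-- the two ports agree on every input
theorem pvMainEq (prompt : String) (t : Int) :
    pad_prompt_to_target_tokens prompt t = pad_prompt_to_target_tokens_alt prompt t := by
  rw [pad_prompt_to_target_tokens, pad_prompt_to_target_tokens_alt]
  simp only []
  set n : Int := ((PySem.Str.split₀ prompt).length : Int) with hn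
  by_cases h1 : n ≥ t
  · rw [if_pos h1, if_pos (by omega)]
  · rw [if_neg h1, if_neg (show ¬ (t - n ≤ 0) by omega)]
    -- padding text equal
    rw [pvPadLoop_eq, pvPadWordsLen]
    simp only [List.nil_append]
    -- marker handling
    by_cases hm : ("Answer:".toList) <:+: prompt.toList
    · have hIn : PySem.Str.isIn "Answer:" prompt = true := (PySem.Str.isIn_iff_infix _ _).mpr hm
      have hfe : PySem.Str.find prompt "Answer:" = PySem.Chars.find prompt.toList "Answer:".toList :=
        PySem.Str.find_eq _ _
      have hne : ¬ (PySem.Chars.find prompt.toList "Answer:".toList = -1) := by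
        rw [PySem.Chars.find_eq_neg_one_iff]; exact fun h => h hm
      have hge : 0 ≤ PySem.Chars.find prompt.toList "Answer:".toList := by
        have := PySem.Chars.neg_one_le_find prompt.toList "Answer:".toList
        omega
      set j : Int := PySem.Chars.find prompt.toList "Answer:".toList with hj
      have hsplit : PySem.Str.splitMax? prompt "Answer:" 1 =
          some [String.ofList (prompt.toList.take j.toNat),
                String.ofList (prompt.toList.drop (j.toNat + 7))] := by
        rw [PySem.Str.splitMax?, PySem.Chars.splitMax?]
        rw [if_neg (by decide)]
        rw [pvSplitOnMaxOne _ _ (by decide), if_neg hne]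
        rfl
      rw [hIn, if_pos rfl, hsplit, hfe]
      rw [if_neg hne]
      have e1 : PySem.Str.slice prompt (some 0) (some j) = String.ofList (prompt.toList.take j.toNat) := by
        apply String.toList_inj.mp
        rw [PySem.Str.toList_slice, String.toList_ofList]
        show PySem.List.slice _ _ _ = _
        rw [PySem.List.slice_zero_start, show (some j : Option Int) = some ((j.toNat : Nat) : Int) by
          rw [Int.toNat_of_nonneg hge], PySem.List.slice_to_natCast]
      have e2 : PySem.Str.slice prompt (some (j + 7)) none = String.ofList (prompt.toList.drop (j.toNat + 7)) := by
        apply String.toList_inj.mp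
        rw [PySem.Str.toList_slice, String.toList_ofList]
        show PySem.List.slice _ _ _ = _
        rw [show j + 7 = ((j.toNat + 7 : Nat) : Int) by omega, PySem.List.slice_from_natCast]
      rw [e1, e2]
    · have hIn : PySem.Str.isIn "Answer:" prompt = false := by
        rw [← Bool.not_eq_true, PySem.Str.isIn_iff_infix]; exact hm
      have hfe : PySem.Str.find prompt "Answer:" = -1 := by
        rw [PySem.Str.find_eq, PySem.Chars.find_eq_neg_one_iff]; exact hm
      rw [hIn, hfe]
      simp

-- ===== VERDICT (by name: the statement is the Claim_ definition above) =====
theorem pad_prompt_to_target_tokens_spec : Claim_equal_pad_prompt_to_target_tokens := by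
  intro prompt target_tokens _
  unfold Spec_pad_prompt_to_target_tokens
  exact pvMainEq prompt target_tokens
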